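-- pv_equiv track=rewrite | github.com/microsoft/healthfutures-evagg | scripts/post_processing/nasa_tlx_analysis.py | categorize_users
-- ===== SOURCE A (Python) =====
-- def categorize_users(with_scores, without_scores):
--     """Categorize users into three groups based on their change in task load (NASA TLX weighted scores)."""
--     decrease_users = []
--     increase_users = []
--     no_change_users = []
--
--     for i in range(len(with_scores)):
--         if with_scores[i] < without_scores[i]:
--             decrease_users.append(i)
--         elif with_scores[i] > without_scores[i]:
--             increase_users.append(i)
--         else:
--             no_change_users.append(i)
--
--     return decrease_users, increase_users, no_change_users
-- ===== SOURCE B (Python) =====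
-- def categorize_users(with_scores, without_scores):
--     """Categorize users into three groups based on their change in task load (NASA TLX weighted scores)."""
--     decrease_users = [i for i in range(len(with_scores)) if with_scores[i] < without_scores[i]]
--     increase_users = [i for i in range(len(with_scores)) if with_scores[i] > without_scores[i]]
--     no_change_users = [i for i in range(len(with_scores))
--                        if not (with_scores[i] < without_scores[i]) and not (with_scores[i] > without_scores[i])]
--     return decrease_users, increase_users, no_change_users
-- ===== Notes on version B (the rewrite author's own statement) =====
-- stated objective: alternative
-- what changed: Replaces the single-pass if/elif/else dispatch with three independent filtered scans over the index range, one per output list.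
import Mathlib
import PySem

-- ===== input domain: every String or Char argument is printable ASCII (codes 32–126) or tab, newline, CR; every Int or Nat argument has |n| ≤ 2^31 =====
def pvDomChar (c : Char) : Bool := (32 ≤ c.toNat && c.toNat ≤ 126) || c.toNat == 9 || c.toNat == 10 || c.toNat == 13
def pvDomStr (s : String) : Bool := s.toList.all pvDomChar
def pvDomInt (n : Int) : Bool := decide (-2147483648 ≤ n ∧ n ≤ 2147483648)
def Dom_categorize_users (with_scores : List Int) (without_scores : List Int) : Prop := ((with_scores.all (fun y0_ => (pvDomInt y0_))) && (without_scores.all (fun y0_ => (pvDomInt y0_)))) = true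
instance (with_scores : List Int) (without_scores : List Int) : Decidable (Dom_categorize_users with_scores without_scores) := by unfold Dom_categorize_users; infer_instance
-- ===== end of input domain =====

-- B rebuilds each of the three output lists with its own filtered scan over the index range instead of A's single-pass if/elif/else dispatch; same return value wherever A returns.


-- ===== PORT A =====
-- one pass over range(len(with_scores)); if/elif/else appends i to one of three accumulators
def categorize_users (with_scores : List Int) (without_scores : List Int) : List Int × List Int × List Int :=
  (PySem.List.pyRange 0 with_scores.length 1).foldl
    (fun (st : List Int × List Int × List Int) i =>
      let a := (PySem.List.pyGet? with_scores i).getD 0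
      let b := (PySem.List.pyGet? without_scores i).getD 0
      if a < b then (st.1 ++ [i], st.2.1, st.2.2)
      else if b < a then (st.1, st.2.1 ++ [i], st.2.2)
      else (st.1, st.2.1, st.2.2 ++ [i]))
    ([], [], [])

-- ===== PORT B =====
-- three independent filtered scans over the same index range
def categorize_users_alt (with_scores : List Int) (without_scores : List Int) : List Int × List Int × List Int :=
  let r := PySem.List.pyRange 0 with_scores.length 1
  let lt := fun i => decide ((PySem.List.pyGet? with_scores i).getD 0 < (PySem.List.pyGet? without_scores i).getD 0)
  let gt := fun i => decide ((PySem.List.pyGet? without_scores i).getD 0 < (PySem.List.pyGet? with_scores i).getD 0)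
  (r.filter lt, r.filter gt, r.filter (fun i => !lt i && !gt i))

-- ===== PRECONDITION & SPEC =====
-- A (and B) raise IndexError when without_scores is shorter than with_scores; Pre_ excludes exactly those inputs.
def Pre_categorize_users (with_scores : List Int) (without_scores : List Int) : Prop :=
  with_scores.length ≤ without_scores.length
instance (with_scores : List Int) (without_scores : List Int) : Decidable (Pre_categorize_users with_scores without_scores) := by unfold Pre_categorize_users; infer_instance
def pvWitness_categorize_users : List Int × List Int := ([1, 5, 3], [2, 4, 3])

def Spec_categorize_users (with_scores : List Int) (without_scores : List Int) (out : List Int × List Int × List Int) : Prop := out = categorize_users_alt with_scores without_scores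
instance (with_scores : List Int) (without_scores : List Int) (out : List Int × List Int × List Int) : Decidable (Spec_categorize_users with_scores without_scores out) := by unfold Spec_categorize_users; infer_instance

-- ===== CLAIM (what is proved, stated in full; the proofs are below) =====
def Claim_equal_categorize_users : Prop := ∀ (with_scores : List Int) (without_scores : List Int), Dom_categorize_users with_scores without_scores → Pre_categorize_users with_scores without_scores → Spec_categorize_users with_scores without_scores (categorize_users with_scores without_scores)

-- ===== LEMMAS AND PROOFS =====

-- A's single fold, started on arbitrary accumulators, appends exactly the three filters of the list.
theorem fold_eq_filters (p q : Int → Bool) (hpq : ∀ i, p i = true → q i = false) (l : List Int) (d inc nc : List Int) :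
    l.foldl
      (fun (st : List Int × List Int × List Int) i =>
        if p i then (st.1 ++ [i], st.2.1, st.2.2)
        else if q i then (st.1, st.2.1 ++ [i], st.2.2)
        else (st.1, st.2.1, st.2.2 ++ [i]))
      (d, inc, nc)
    = (d ++ l.filter p, inc ++ l.filter q, nc ++ l.filter (fun i => !p i && !q i)) := by
  induction l generalizing d inc nc with
  | nil => simp
  | cons x xs ih =>
    by_cases hp : p x
    · simp [hp, hpq x hp, ih]
    · by_cases hq : q x
      · simp [hp, hq, ih]
      · simp [hp, hq, ih]

-- ===== VERDICT (by name: the statement is the Claim_ definition above) =====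
theorem categorize_users_spec : Claim_equal_categorize_users := by
  intro ws wo _ _
  show categorize_users ws wo = categorize_users_alt ws wo
  have h := fold_eq_filters
    (fun i => decide ((PySem.List.pyGet? ws i).getD 0 < (PySem.List.pyGet? wo i).getD 0))
    (fun i => decide ((PySem.List.pyGet? wo i).getD 0 < (PySem.List.pyGet? ws i).getD 0))
    (by intro i hi; simp at hi ⊢; omega)
    (PySem.List.pyRange 0 ws.length 1) [] [] []
  simp only [decide_eq_true_eq] at h
  simpa [categorize_users, categorize_users_alt] using h
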